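-- pv_equiv track=rewrite | github.com/AndrewMonteith/LZ77 | lz77.py | lz77_encode
-- ===== SOURCE A (Python) =====
-- def do_sequences_match(source, index1, index2, length):
--     "time optimised version for comparing 2 subsequences for equality"
--     terminate = index1+length
--
--     while index1 < terminate:
--         if source[index1] != source[index2]:
--             return False
--         index1 += 1
--         index2 += 1
--     return True
--
-- def lz77_encode(source, window_size=65535, lookahead_window_size=255):
--     def find_shared_sequence_in_window(source_i):
--         if source_i == 0:
--             return (source_i, 1)
--
--         start_of_window = max(0, source_i-window_size)
--         end_of_lookahead = min(len(source), source_i+lookahead_window_size+1)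
--
--         longest_seq_index, longest_seq_len = source_i, 1
--         window_i, cur_seq_len = source_i-1, 1
--
--         while start_of_window <= window_i:
--             would_overflow_window = window_i + cur_seq_len > source_i
--
--             if would_overflow_window:
--                 window_i -= 1
--             elif do_sequences_match(source, window_i, source_i, cur_seq_len):
--                 longest_seq_index = window_i
--                 longest_seq_len = cur_seq_len
--
--                 cur_seq_len += 1  # going to look for a longer sequence
--
--                 looking_outside_lookahead_window = source_i + cur_seq_len > end_of_lookahead
--                 if looking_outside_lookahead_window:
--                     break  # can
--             else:
--                 window_i -= 1
--
--         return (longest_seq_index, longest_seq_len)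
--
--     result = []
--     byte_ptr = 0
--
--     while byte_ptr < len(source):
--         (ptr, seq_len) = find_shared_sequence_in_window(byte_ptr)
--
--         if ptr == byte_ptr:
--             result.append((0, 0, source[byte_ptr]))
--             byte_ptr += 1
--         else:
--             how_far_back = byte_ptr - ptr
--             next_byte = source[byte_ptr+seq_len] if byte_ptr + \
--                 seq_len < len(source) else None
--
--             result.append((how_far_back, seq_len, next_byte))
--             byte_ptr += seq_len+1
--
--     return result
-- ===== SOURCE B (Python) =====
-- def lz77_encode(source, window_size=65535, lookahead_window_size=255):
--     # Alternative formulation: per position, compute each candidate's common-prefix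
--     # length directly (one extension scan, no incremental re-comparison), scanning
--     # candidates left-to-right with >=-update so the rightmost best match wins.
--     n = len(source)
--     result = []
--     i = 0
--     while i < n:
--         if i == 0:
--             result.append((0, 0, source[0]))
--             i = 1
--             continue
--         start = max(0, i - window_size)
--         cap = max(1, min(n, i + lookahead_window_size + 1) - i)
--         best_len, best_pos = 0, i
--         for p in range(start, i):
--             limit = min(cap, i - p)
--             m = 0
--             while m < limit and source[p + m] == source[i + m]:
--                 m += 1
--             if m >= best_len and m > 0:
--                 best_len, best_pos = m, p
--         if best_len == 0:
--             result.append((0, 0, source[i]))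
--             i += 1
--         else:
--             nxt = source[i + best_len] if i + best_len < n else None
--             result.append((i - best_pos, best_len, nxt))
--             i += best_len + 1
--     return result
-- ===== Notes on version B (the rewrite author's own statement) =====
-- stated objective: alternative
-- what changed: B replaces A's right-to-left incremental match-length climbing (which re-compares the whole prefix via do_sequences_match at every candidate length) with a direct common-prefix extension computed once per window position, scanned left-to-right with a >=-update so the rightmost longest match wins.
import Mathlib
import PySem

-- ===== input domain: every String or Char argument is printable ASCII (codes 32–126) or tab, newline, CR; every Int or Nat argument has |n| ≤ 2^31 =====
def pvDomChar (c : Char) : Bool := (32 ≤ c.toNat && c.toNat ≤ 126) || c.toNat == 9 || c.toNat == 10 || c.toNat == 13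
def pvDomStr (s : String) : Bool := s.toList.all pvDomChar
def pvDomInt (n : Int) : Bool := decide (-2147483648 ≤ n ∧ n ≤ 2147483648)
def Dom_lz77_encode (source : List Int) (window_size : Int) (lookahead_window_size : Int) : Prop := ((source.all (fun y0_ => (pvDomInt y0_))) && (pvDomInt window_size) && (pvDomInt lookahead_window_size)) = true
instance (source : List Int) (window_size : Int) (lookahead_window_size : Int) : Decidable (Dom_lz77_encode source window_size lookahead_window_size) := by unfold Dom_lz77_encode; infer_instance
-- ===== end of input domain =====

-- B replaces A's incremental match-length climbing (with full re-comparison per length)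
-- by a direct common-prefix extension per candidate, scanned left-to-right; same return
-- value on every input (equivalence of the return value; neither mutates its argument).

-- ===== PORT A =====
-- while loop of do_sequences_match; fuel = exact number of remaining comparisons,
-- so the fuel-0 base is never reached before the Python loop exits
def dsmLoop (source : List Int) (fuel : Nat) (index1 index2 terminate : Int) : Bool :=
  match fuel with
  | 0 => true
  | fuel + 1 =>
    if index1 < terminate then
      if PySem.List.pyGet? source index1 ≠ PySem.List.pyGet? source index2 then false
      else dsmLoop source fuel (index1 + 1) (index2 + 1) terminate
    else true

def do_sequences_match (source : List Int) (index1 index2 length : Int) : Bool :=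
  dsmLoop source length.toNat index1 index2 (index1 + length)

-- inner while loop of find_shared_sequence_in_window; fuel = the loop's decreasing
-- measure (window distance plus remaining lookahead), consumed ≥ 1 per iteration
def findLoop (source : List Int) (fuel : Nat) (source_i start_of_window end_of_lookahead : Int)
    (longest_seq_index longest_seq_len window_i cur_seq_len : Int) : Int × Int :=
  match fuel with
  | 0 => (longest_seq_index, longest_seq_len)
  | fuel + 1 =>
    if start_of_window ≤ window_i then
      if window_i + cur_seq_len > source_i then
        findLoop source fuel source_i start_of_window end_of_lookahead longest_seq_index longest_seq_len (window_i - 1) cur_seq_len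
      else if do_sequences_match source window_i source_i cur_seq_len then
        if source_i + (cur_seq_len + 1) > end_of_lookahead then
          (window_i, cur_seq_len)
        else
          findLoop source fuel source_i start_of_window end_of_lookahead window_i cur_seq_len window_i (cur_seq_len + 1)
      else
        findLoop source fuel source_i start_of_window end_of_lookahead longest_seq_index longest_seq_len (window_i - 1) cur_seq_len
    else (longest_seq_index, longest_seq_len)

def find_shared_sequence_in_window (source : List Int) (window_size lookahead_window_size source_i : Int) : Int × Int :=
  if source_i = 0 then (source_i, 1)
  else
    let start_of_window := max 0 (source_i - window_size)
    let end_of_lookahead := min (source.length : Int) (source_i + lookahead_window_size + 1)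
    findLoop source ((source_i - start_of_window).toNat + (end_of_lookahead - source_i).toNat)
      source_i start_of_window end_of_lookahead source_i 1 (source_i - 1) 1

-- outer while loop of lz77_encode; fuel = number of iterations + 1 (byte_ptr advances ≥ 1)
def encodeLoopA (source : List Int) (window_size lookahead_window_size : Int) (fuel : Nat)
    (result : List (Int × Int × Option Int)) (byte_ptr : Int) : List (Int × Int × Option Int) :=
  match fuel with
  | 0 => result
  | fuel + 1 =>
    if byte_ptr < (source.length : Int) then
      let fs := find_shared_sequence_in_window source window_size lookahead_window_size byte_ptr
      if fs.1 = byte_ptr then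
        encodeLoopA source window_size lookahead_window_size fuel
          (result ++ [(0, 0, PySem.List.pyGet? source byte_ptr)]) (byte_ptr + 1)
      else
        let next_byte := if byte_ptr + fs.2 < (source.length : Int) then PySem.List.pyGet? source (byte_ptr + fs.2) else none
        encodeLoopA source window_size lookahead_window_size fuel
          (result ++ [(byte_ptr - fs.1, fs.2, next_byte)]) (byte_ptr + fs.2 + 1)
    else result

def lz77_encode (source : List Int) (window_size : Int) (lookahead_window_size : Int) : List (Int × Int × Option Int) :=
  encodeLoopA source window_size lookahead_window_size (source.length + 1) [] 0

-- ===== PORT B =====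
-- inner while: direct common-prefix extension of candidate p against position i,
-- capped at limit; fuel = exact remaining room (limit - m)
def extendLoop (source : List Int) (fuel : Nat) (p i limit m : Int) : Int :=
  match fuel with
  | 0 => m
  | fuel + 1 =>
    if m < limit ∧ PySem.List.pyGet? source (p + m) = PySem.List.pyGet? source (i + m) then
      extendLoop source fuel p i limit (m + 1)
    else m

-- body of B's `for p in range(start, i)` loop
def bStep (source : List Int) (cap i : Int) (s : Int × Int) (p : Int) : Int × Int :=
  let m := extendLoop source (min cap (i - p)).toNat p i (min cap (i - p)) 0
  if s.1 ≤ m ∧ 0 < m then (m, p) else s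

def bestMatch (source : List Int) (window_size lookahead_window_size i : Int) : Int × Int :=
  let n := (source.length : Int)
  let start := max 0 (i - window_size)
  let cap := max 1 (min n (i + lookahead_window_size + 1) - i)
  (PySem.List.pyRange start i 1).foldl (bStep source cap i) (0, i)

-- outer while loop of B; fuel = number of iterations + 1 (i advances ≥ 1)
def encodeLoopB (source : List Int) (window_size lookahead_window_size : Int) (fuel : Nat)
    (result : List (Int × Int × Option Int)) (i : Int) : List (Int × Int × Option Int) :=
  match fuel with
  | 0 => result
  | fuel + 1 =>
    if i < (source.length : Int) then
      if i = 0 then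
        encodeLoopB source window_size lookahead_window_size fuel
          (result ++ [(0, 0, PySem.List.pyGet? source 0)]) 1
      else
        let b := bestMatch source window_size lookahead_window_size i
        if b.1 = 0 then
          encodeLoopB source window_size lookahead_window_size fuel
            (result ++ [(0, 0, PySem.List.pyGet? source i)]) (i + 1)
        else
          let nxt := if i + b.1 < (source.length : Int) then PySem.List.pyGet? source (i + b.1) else none
          encodeLoopB source window_size lookahead_window_size fuel
            (result ++ [(i - b.2, b.1, nxt)]) (i + b.1 + 1)
    else result

def lz77_encode_alt (source : List Int) (window_size : Int) (lookahead_window_size : Int) : List (Int × Int × Option Int) :=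
  encodeLoopB source window_size lookahead_window_size (source.length + 1) [] 0

-- ===== PRECONDITION & SPEC =====
def Spec_lz77_encode (source : List Int) (window_size : Int) (lookahead_window_size : Int) (out : List (Int × Int × Option Int)) : Prop := out = lz77_encode_alt source window_size lookahead_window_size
instance (source : List Int) (window_size : Int) (lookahead_window_size : Int) (out : List (Int × Int × Option Int)) : Decidable (Spec_lz77_encode source window_size lookahead_window_size out) := by unfold Spec_lz77_encode; infer_instance

-- ===== CLAIM (what is proved, stated in full; the proofs are below) =====
def Claim_equal_lz77_encode : Prop := ∀ (source : List Int) (window_size : Int) (lookahead_window_size : Int), Dom_lz77_encode source window_size lookahead_window_size → Spec_lz77_encode source window_size lookahead_window_size (lz77_encode source window_size lookahead_window_size)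

-- ===== LEMMAS AND PROOFS =====
-- M p: the capped common-prefix length B computes for candidate p
def Mfun (source : List Int) (i cap p : Int) : Int :=
  extendLoop source (min cap (i - p)).toNat p i (min cap (i - p)) 0

-- running maximum of Mfun over [start, w]
def maxM (source : List Int) (i cap start w : Int) : Int :=
  if w < start then 0
  else max (maxM source i cap start (w - 1)) (Mfun source i cap w)
termination_by (w - start + 1).toNat
decreasing_by omega

-- rightmost maximizer of Mfun over [start, w] (sentinel i when the max is 0)
def rpos (source : List Int) (i cap start w : Int) : Int :=
  if w < start then i
  else if maxM source i cap start (w - 1) ≤ Mfun source i cap w ∧ 1 ≤ Mfun source i cap w then w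
  else rpos source i cap start (w - 1)
termination_by (w - start + 1).toNat
decreasing_by omega

theorem ext_ge (source : List Int) : ∀ (fuel : Nat) (p i limit m : Int),
    m ≤ extendLoop source fuel p i limit m := by
  intro fuel
  induction fuel with
  | zero => intro p i limit m; exact le_rfl
  | succ fuel ih =>
    intro p i limit m
    rw [extendLoop]
    split_ifs with h
    · have := ih p i limit (m + 1); omega
    · exact le_rfl

theorem ext_le (source : List Int) : ∀ (fuel : Nat) (p i limit m : Int),
    extendLoop source fuel p i limit m ≤ max m limit := by
  intro fuel
  induction fuel with
  | zero => intro p i limit m; rw [extendLoop]; omega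
  | succ fuel ih =>
    intro p i limit m
    rw [extendLoop]
    split_ifs with h
    · have := ih p i limit (m + 1); omega
    · omega

theorem ext_matched (source : List Int) : ∀ (fuel : Nat) (p i limit m : Int),
    ∀ k, m ≤ k → k < extendLoop source fuel p i limit m →
      PySem.List.pyGet? source (p + k) = PySem.List.pyGet? source (i + k) := by
  intro fuel
  induction fuel with
  | zero => intro p i limit m k hk1 hk2; rw [extendLoop] at hk2; omega
  | succ fuel ih =>
    intro p i limit m k hk1 hk2
    rw [extendLoop] at hk2
    split_ifs at hk2 with h
    · rcases eq_or_lt_of_le hk1 with rfl | h'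
      · exact h.2
      · exact ih p i limit (m + 1) k (by omega) hk2
    · omega

theorem ext_stop (source : List Int) : ∀ (fuel : Nat) (p i limit m : Int),
    (limit - m).toNat ≤ fuel →
    extendLoop source fuel p i limit m < limit →
      PySem.List.pyGet? source (p + extendLoop source fuel p i limit m) ≠
        PySem.List.pyGet? source (i + extendLoop source fuel p i limit m) := by
  intro fuel
  induction fuel with
  | zero => intro p i limit m hf hlt; rw [extendLoop] at hlt ⊢; omega
  | succ fuel ih =>
    intro p i limit m hf
    rw [extendLoop]
    split_ifs with h
    · exact ih p i limit (m + 1) (by omega)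
    · intro hlt heq
      exact h ⟨hlt, heq⟩

theorem Mfun_nonneg (source : List Int) (i cap p : Int) : 0 ≤ Mfun source i cap p :=
  ext_ge source _ p i _ 0

theorem Mfun_le_cap (source : List Int) (i cap p : Int) (hcap : 1 ≤ cap) :
    Mfun source i cap p ≤ cap := by
  have h := ext_le source (min cap (i - p)).toNat p i (min cap (i - p)) 0
  unfold Mfun
  omega

theorem Mfun_le_ip (source : List Int) (i cap p : Int) :
    Mfun source i cap p ≤ max 0 (i - p) := by
  have h := ext_le source (min cap (i - p)).toNat p i (min cap (i - p)) 0
  unfold Mfun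
  omega

-- characterization: cur ≤ M p ↔ the first cur bytes match (when cur fits the caps)
theorem Mfun_ge_iff (source : List Int) (i cap p cur : Int)
    (_h1 : 1 ≤ cur) (h2 : cur ≤ cap) (h3 : cur ≤ i - p) :
    cur ≤ Mfun source i cap p ↔
      ∀ k, 0 ≤ k → k < cur → PySem.List.pyGet? source (p + k) = PySem.List.pyGet? source (i + k) := by
  have hM : Mfun source i cap p = extendLoop source (min cap (i - p)).toNat p i (min cap (i - p)) 0 := rfl
  constructor
  · intro h k hk1 hk2
    exact ext_matched source (min cap (i - p)).toNat p i (min cap (i - p)) 0 k hk1 (by omega)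
  · intro h
    by_contra hlt
    rw [not_le] at hlt
    have h0 := Mfun_nonneg source i cap p
    have hstop := ext_stop source (min cap (i - p)).toNat p i (min cap (i - p)) 0 (by omega) (by omega)
    rw [← hM] at hstop
    exact hstop (h _ h0 hlt)

theorem dsmLoop_iff (source : List Int) : ∀ (fuel : Nat) (a b t : Int), (t - a).toNat ≤ fuel →
    (dsmLoop source fuel a b t = true ↔
      ∀ k, 0 ≤ k → k < t - a → PySem.List.pyGet? source (a + k) = PySem.List.pyGet? source (b + k)) := by
  intro fuel
  induction fuel with
  | zero =>
    intro a b t hf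
    rw [dsmLoop]
    constructor
    · intro _ k hk1 hk2; omega
    · intro _; rfl
  | succ fuel ih =>
    intro a b t hf
    rw [dsmLoop]
    split_ifs with hlt hne
    · simp only [Bool.false_eq_true, false_iff]
      intro h
      exact hne (by simpa using h 0 le_rfl (by omega))
    · rw [ih (a + 1) (b + 1) t (by omega)]
      rw [ne_eq, not_not] at hne
      constructor
      · intro h k hk1 hk2
        rcases eq_or_lt_of_le hk1 with rfl | h'
        · simpa using hne
        · have := h (k - 1) (by omega) (by omega)
          convert this using 2 <;> ring
      · intro h k hk1 hk2
        have := h (k + 1) (by omega) (by omega)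
        convert this using 2 <;> ring
    · simp only [true_iff]
      intro k hk1 hk2
      omega

theorem dsm_iff_M (source : List Int) (i cap w cur : Int)
    (h1 : 1 ≤ cur) (h2 : cur ≤ cap) (h3 : cur ≤ i - w) :
    do_sequences_match source w i cur = true ↔ cur ≤ Mfun source i cap w := by
  rw [Mfun_ge_iff source i cap w cur h1 h2 h3]
  unfold do_sequences_match
  rw [dsmLoop_iff source cur.toNat w i (w + cur) (by omega)]
  constructor
  · intro h k hk1 hk2; exact h k hk1 (by omega)
  · intro h k hk1 hk2; exact h k hk1 (by omega)

theorem maxM_nonneg (source : List Int) (i cap start : Int) : ∀ w, 0 ≤ maxM source i cap start w := by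
  intro w
  fun_induction maxM <;> omega

theorem maxM_le_cap (source : List Int) (i cap start : Int) (hcap : 1 ≤ cap) :
    ∀ w, maxM source i cap start w ≤ cap := by
  intro w
  fun_induction maxM with
  | case1 => omega
  | case2 w h ih =>
    have := Mfun_le_cap source i cap w hcap
    omega

theorem rpos_le (source : List Int) (i cap start : Int) :
    ∀ w, 1 ≤ maxM source i cap start w → start ≤ rpos source i cap start w ∧ rpos source i cap start w ≤ w := by
  intro w
  fun_induction rpos with
  | case1 w h =>
    intro hm
    rw [maxM] at hm
    simp [h] at hm
  | case2 w h hc => intro _; omega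
  | case3 w h hc ih =>
    intro hm
    rw [maxM] at hm
    rw [if_neg h] at hm
    have h0 := maxM_nonneg source i cap start (w - 1)
    have hM0 := Mfun_nonneg source i cap w
    have : 1 ≤ maxM source i cap start (w - 1) := by
      by_contra hx
      rw [not_le] at hx
      apply hc
      constructor <;> omega
    have := ih this
    omega

-- A's inner loop computes (rightmost maximizer, maximum) of Mfun over [start, w],
-- relative to the climbing threshold cur (cap abstracts max 1 (endla - i))
theorem findLoop_spec (source : List Int) (i start endla cap : Int)
    (Hc1 : 1 ≤ cap) (Hc2 : endla - i ≤ cap) (Hc3 : cap = 1 ∨ cap = endla - i) :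
    ∀ (fuel : Nat) (bi bl w cur : Int),
    (w - start + 1).toNat + (endla - i - cur + 1).toNat ≤ fuel →
    1 ≤ cur → cur ≤ cap → (cur = 1 ∨ i + cur ≤ endla) →
    (∀ p, start ≤ p → w < p → p < i → Mfun source i cap p < cur) →
    findLoop source fuel i start endla bi bl w cur =
      if cur ≤ maxM source i cap start w then
        (rpos source i cap start w, maxM source i cap start w)
      else (bi, bl) := by
  intro fuel
  induction fuel with
  | zero =>
    intro bi bl w cur Hf H1 H2 H3 H4
    rw [findLoop, if_neg (by rw [maxM, if_pos (by omega)]; omega)]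
  | succ fuel ih =>
    intro bi bl w cur Hf H1 H2 H3 H4
    rw [findLoop]
    by_cases h1 : start ≤ w
    · rw [if_pos h1]
      by_cases h2 : w + cur > i
      · -- overflow: move the window left
        rw [if_pos h2]
        have hip := Mfun_le_ip source i cap w
        have hMw : Mfun source i cap w < cur := by omega
        have H4' : ∀ p, start ≤ p → w - 1 < p → p < i → Mfun source i cap p < cur := by
          intro p hp1 hp2 hp3
          by_cases hpw : p = w
          · subst hpw; exact hMw
          · exact H4 p hp1 (by omega) hp3
        rw [ih bi bl (w - 1) cur (by omega) H1 H2 H3 H4']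
        have hmm : maxM source i cap start w = max (maxM source i cap start (w - 1)) (Mfun source i cap w) := by
          rw [maxM, if_neg (by omega)]
        by_cases hc : cur ≤ maxM source i cap start (w - 1)
        · rw [if_pos hc, if_pos (by omega)]
          have hrp : rpos source i cap start w = rpos source i cap start (w - 1) := by
            rw [rpos, if_neg (by omega), if_neg (by rw [not_and_or, not_le]; left; omega)]
          simp only [Prod.mk.injEq]
          exact ⟨hrp.symm, by omega⟩
        · rw [if_neg hc, if_neg (by omega)]
      · rw [if_neg h2]
        by_cases h3 : do_sequences_match source w i cur = true
        · rw [if_pos h3]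
          by_cases h4 : i + (cur + 1) > endla
          · -- match succeeded and the lookahead window is exhausted: break
            rw [if_pos h4]
            have hMle := Mfun_le_cap source i cap w Hc1
            have hmle := maxM_le_cap source i cap start Hc1 (w - 1)
            have hM : cur ≤ Mfun source i cap w := by
              rw [← dsm_iff_M source i cap w cur H1 H2 (by omega)]; exact h3
            have hcc : cur = cap := by omega
            have hmm : maxM source i cap start w = max (maxM source i cap start (w - 1)) (Mfun source i cap w) := by
              rw [maxM, if_neg (by omega)]
            rw [if_pos (by omega)]
            have hrp : rpos source i cap start w = w := by
              rw [rpos, if_neg (by omega), if_pos ⟨by omega, by omega⟩]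
            simp only [Prod.mk.injEq]
            exact ⟨hrp.symm, by omega⟩
          · -- match succeeded: look for a longer one at the same position
            rw [if_neg h4]
            have hM : cur ≤ Mfun source i cap w := by
              rw [← dsm_iff_M source i cap w cur H1 H2 (by omega)]; exact h3
            have H4' : ∀ p, start ≤ p → w < p → p < i → Mfun source i cap p < cur + 1 := by
              intro p hp1 hp2 hp3
              have := H4 p hp1 hp2 hp3
              omega
            rw [ih w cur w (cur + 1) (by omega) (by omega) (by omega) (Or.inr (by omega)) H4']
            have hmm : maxM source i cap start w = max (maxM source i cap start (w - 1)) (Mfun source i cap w) := by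
              rw [maxM, if_neg (by omega)]
            rw [if_pos (show cur ≤ maxM source i cap start w by omega)]
            by_cases hc : cur + 1 ≤ maxM source i cap start w
            · rw [if_pos hc]
            · rw [if_neg hc]
              have hrp : rpos source i cap start w = w := by
                rw [rpos, if_neg (by omega), if_pos ⟨by omega, by omega⟩]
              simp only [Prod.mk.injEq]
              exact ⟨hrp.symm, by omega⟩
        · -- no match at this position: move the window left
          rw [if_neg h3]
          have hMw : Mfun source i cap w < cur := by
            by_contra hx
            rw [not_lt] at hx
            rw [← dsm_iff_M source i cap w cur H1 H2 (by omega)] at hx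
            exact h3 hx
          have H4' : ∀ p, start ≤ p → w - 1 < p → p < i → Mfun source i cap p < cur := by
            intro p hp1 hp2 hp3
            by_cases hpw : p = w
            · subst hpw; exact hMw
            · exact H4 p hp1 (by omega) hp3
          rw [ih bi bl (w - 1) cur (by omega) H1 H2 H3 H4']
          have hmm : maxM source i cap start w = max (maxM source i cap start (w - 1)) (Mfun source i cap w) := by
            rw [maxM, if_neg (by omega)]
          by_cases hc : cur ≤ maxM source i cap start (w - 1)
          · rw [if_pos hc, if_pos (by omega)]
            have hrp : rpos source i cap start w = rpos source i cap start (w - 1) := by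
              rw [rpos, if_neg (by omega), if_neg (by rw [not_and_or, not_le]; left; omega)]
            simp only [Prod.mk.injEq]
            exact ⟨hrp.symm, by omega⟩
          · rw [if_neg hc, if_neg (by omega)]
    · -- window exhausted
      rw [if_neg h1, if_neg (by rw [maxM, if_pos (by omega)]; omega)]

-- B's fold computes the same pair
theorem bStep_eq (source : List Int) (cap i : Int) (s : Int × Int) (p : Int) :
    bStep source cap i s p =
      if s.1 ≤ Mfun source i cap p ∧ 0 < Mfun source i cap p then (Mfun source i cap p, p) else s := rfl

theorem foldB_char (source : List Int) (i cap start : Int) :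
    ∀ w, start - 1 ≤ w →
      (PySem.List.pyRange start (w + 1) 1).foldl (bStep source cap i) (0, i) =
        if 1 ≤ maxM source i cap start w then
          (maxM source i cap start w, rpos source i cap start w)
        else (0, i) := by
  intro w hw
  induction w, hw using Int.le_induction with
  | base =>
    rw [show start - 1 + 1 = start by omega, PySem.List.pyRange_one_eq_nil le_rfl]
    rw [List.foldl_nil, if_neg (by rw [maxM, if_pos (by omega)]; omega)]
  | succ w hw ih =>
    rw [PySem.List.pyRange_one_succ_right (by omega), List.foldl_append,
        List.foldl_cons, List.foldl_nil, ih, bStep_eq]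
    have hM0 := Mfun_nonneg source i cap (w + 1)
    have hmm0 := maxM_nonneg source i cap start w
    have hmm : maxM source i cap start (w + 1) = max (maxM source i cap start w) (Mfun source i cap (w + 1)) := by
      rw [maxM, if_neg (by omega)]
      simp only [add_sub_cancel_right]
    have hrp : rpos source i cap start (w + 1) =
        if maxM source i cap start w ≤ Mfun source i cap (w + 1) ∧ 1 ≤ Mfun source i cap (w + 1)
        then w + 1 else rpos source i cap start w := by
      rw [rpos, if_neg (by omega)]
      simp only [add_sub_cancel_right]
    by_cases hc : 1 ≤ maxM source i cap start w
    · rw [if_pos hc]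
      by_cases hcond : maxM source i cap start w ≤ Mfun source i cap (w + 1) ∧ 0 < Mfun source i cap (w + 1)
      · rw [if_pos (show (maxM source i cap start w, rpos source i cap start w).1 ≤ Mfun source i cap (w + 1) ∧ 0 < Mfun source i cap (w + 1) from hcond)]
        rw [if_pos (show 1 ≤ maxM source i cap start (w + 1) by omega)]
        rw [hrp, if_pos ⟨hcond.1, by omega⟩]
        simp only [Prod.mk.injEq]
        exact ⟨by omega, trivial⟩
      · rw [if_neg (show ¬ ((maxM source i cap start w, rpos source i cap start w).1 ≤ Mfun source i cap (w + 1) ∧ 0 < Mfun source i cap (w + 1)) from hcond)]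
        rw [if_pos (show 1 ≤ maxM source i cap start (w + 1) by omega)]
        rw [hrp, if_neg (by omega)]
        simp only [Prod.mk.injEq]
        exact ⟨by omega, trivial⟩
    · rw [if_neg hc]
      by_cases hone : 1 ≤ Mfun source i cap (w + 1)
      · rw [if_pos (show (0, i).1 ≤ Mfun source i cap (w + 1) ∧ 0 < Mfun source i cap (w + 1) from ⟨by omega, by omega⟩)]
        rw [if_pos (show 1 ≤ maxM source i cap start (w + 1) by omega)]
        rw [hrp, if_pos ⟨by omega, hone⟩]
        simp only [Prod.mk.injEq]
        exact ⟨by omega, trivial⟩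
      · rw [if_neg (show ¬ ((0, i).1 ≤ Mfun source i cap (w + 1) ∧ 0 < Mfun source i cap (w + 1)) by simp only [not_and_or, not_lt]; right; omega)]
        rw [if_neg (show ¬ 1 ≤ maxM source i cap start (w + 1) by omega)]

-- abbreviations for the window bounds and the lookahead cap
def startOf (window_size i : Int) : Int := max 0 (i - window_size)
def endOf (source : List Int) (la i : Int) : Int := min (source.length : Int) (i + la + 1)
def capOf (source : List Int) (la i : Int) : Int := max 1 (endOf source la i - i)

theorem find_char (source : List Int) (ws la i : Int) (h1 : 1 ≤ i) :
    find_shared_sequence_in_window source ws la i =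
      if 1 ≤ maxM source i (capOf source la i) (startOf ws i) (i - 1) then
        (rpos source i (capOf source la i) (startOf ws i) (i - 1),
         maxM source i (capOf source la i) (startOf ws i) (i - 1))
      else (i, 1) := by
  rw [find_shared_sequence_in_window, if_neg (by omega)]
  have hspec := findLoop_spec source i (startOf ws i) (endOf source la i) (capOf source la i)
      (le_max_left _ _) (le_max_right _ _)
      (by rcases max_choice 1 (endOf source la i - i) with h | h
          · exact Or.inl h
          · exact Or.inr h)
      ((i - startOf ws i).toNat + (endOf source la i - i).toNat)
      i 1 (i - 1) 1 (by omega) le_rfl (le_max_left _ _) (Or.inl rfl)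
      (by intro p hp1 hp2 hp3; omega)
  exact hspec

theorem bestMatch_char (source : List Int) (ws la i : Int) (h1 : 1 ≤ i) :
    bestMatch source ws la i =
      if 1 ≤ maxM source i (capOf source la i) (startOf ws i) (i - 1) then
        (maxM source i (capOf source la i) (startOf ws i) (i - 1),
         rpos source i (capOf source la i) (startOf ws i) (i - 1))
      else (0, i) := by
  by_cases hs : startOf ws i ≤ i
  · rw [bestMatch]
    have h := foldB_char source i (capOf source la i) (startOf ws i) (i - 1) (by omega)
    rw [show i - 1 + 1 = i by omega] at h
    exact h
  · rw [bestMatch]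
    have hs' : i ≤ max 0 (i - ws) := by unfold startOf at hs; omega
    show (PySem.List.pyRange (max 0 (i - ws)) i 1).foldl
        (bStep source (max 1 (min (source.length : Int) (i + la + 1) - i)) i) (0, i) = _
    rw [PySem.List.pyRange_one_eq_nil hs', List.foldl_nil]
    rw [if_neg (by rw [maxM, if_pos (by omega)]; omega)]

-- single-step unfoldings of the two outer loops
theorem stepA (source : List Int) (ws la : Int) (fuel : Nat) (res : List (Int × Int × Option Int)) (bp : Int)
    (hn : bp < (source.length : Int)) :
    encodeLoopA source ws la (fuel + 1) res bp =
      if (find_shared_sequence_in_window source ws la bp).1 = bp then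
        encodeLoopA source ws la fuel (res ++ [(0, 0, PySem.List.pyGet? source bp)]) (bp + 1)
      else
        encodeLoopA source ws la fuel
          (res ++ [(bp - (find_shared_sequence_in_window source ws la bp).1,
                    (find_shared_sequence_in_window source ws la bp).2,
                    if bp + (find_shared_sequence_in_window source ws la bp).2 < (source.length : Int) then
                      PySem.List.pyGet? source (bp + (find_shared_sequence_in_window source ws la bp).2)
                    else none)])
          (bp + (find_shared_sequence_in_window source ws la bp).2 + 1) := by
  rw [encodeLoopA, if_pos hn]

theorem stepB0 (source : List Int) (ws la : Int) (fuel : Nat) (res : List (Int × Int × Option Int))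
    (hn : (0 : Int) < (source.length : Int)) :
    encodeLoopB source ws la (fuel + 1) res 0 =
      encodeLoopB source ws la fuel (res ++ [(0, 0, PySem.List.pyGet? source 0)]) 1 := by
  rw [encodeLoopB, if_pos hn, if_pos rfl]

theorem stepB (source : List Int) (ws la : Int) (fuel : Nat) (res : List (Int × Int × Option Int)) (bp : Int)
    (hn : bp < (source.length : Int)) (h0 : bp ≠ 0) :
    encodeLoopB source ws la (fuel + 1) res bp =
      if (bestMatch source ws la bp).1 = 0 then
        encodeLoopB source ws la fuel (res ++ [(0, 0, PySem.List.pyGet? source bp)]) (bp + 1)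
      else
        encodeLoopB source ws la fuel
          (res ++ [(bp - (bestMatch source ws la bp).2,
                    (bestMatch source ws la bp).1,
                    if bp + (bestMatch source ws la bp).1 < (source.length : Int) then
                      PySem.List.pyGet? source (bp + (bestMatch source ws la bp).1)
                    else none)])
          (bp + (bestMatch source ws la bp).1 + 1) := by
  rw [encodeLoopB, if_pos hn, if_neg h0]

-- the two outer loops agree from any state, for any common fuel
theorem loops_eq (source : List Int) (ws la : Int) :
    ∀ (fuel : Nat) (res : List (Int × Int × Option Int)) (bp : Int), 0 ≤ bp →
      encodeLoopA source ws la fuel res bp = encodeLoopB source ws la fuel res bp := by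
  intro fuel
  induction fuel with
  | zero => intro res bp _; rfl
  | succ fuel ih =>
    intro res bp hbp
    by_cases hn : bp < (source.length : Int)
    · by_cases h0 : bp = 0
      · subst h0
        rw [stepA source ws la fuel res 0 hn, stepB0 source ws la fuel res hn]
        have hf : find_shared_sequence_in_window source ws la 0 = (0, 1) := by
          rw [find_shared_sequence_in_window, if_pos rfl]
        rw [hf, if_pos rfl]
        exact ih _ 1 (by omega)
      · have h1 : 1 ≤ bp := by omega
        rw [stepA source ws la fuel res bp hn, stepB source ws la fuel res bp hn h0,
            find_char source ws la bp h1, bestMatch_char source ws la bp h1]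
        have hmm0 := maxM_nonneg source bp (capOf source la bp) (startOf ws bp) (bp - 1)
        by_cases hc : 1 ≤ maxM source bp (capOf source la bp) (startOf ws bp) (bp - 1)
        · rw [if_pos hc, if_pos hc]
          have hrle := rpos_le source bp (capOf source la bp) (startOf ws bp) (bp - 1) hc
          rw [if_neg (show ¬ ((rpos source bp (capOf source la bp) (startOf ws bp) (bp - 1),
                maxM source bp (capOf source la bp) (startOf ws bp) (bp - 1)).1 = bp) by omega)]
          rw [if_neg (show ¬ ((maxM source bp (capOf source la bp) (startOf ws bp) (bp - 1),
                rpos source bp (capOf source la bp) (startOf ws bp) (bp - 1)).1 = 0) by omega)]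
          exact ih _ _ (by omega)
        · rw [if_neg hc, if_neg hc, if_pos rfl, if_pos rfl]
          exact ih _ (bp + 1) (by omega)
    · rw [encodeLoopA, if_neg hn, encodeLoopB, if_neg hn]

-- ===== VERDICT (by name: the statement is the Claim_ definition above) =====
theorem lz77_encode_spec : Claim_equal_lz77_encode := by
  intro source window_size lookahead_window_size _
  unfold Spec_lz77_encode lz77_encode lz77_encode_alt
  exact loops_eq source window_size lookahead_window_size (source.length + 1) [] 0 le_rfl
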